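-- pv_equiv track=rewrite | github.com/rakesh1907/Incident-Cortex | integrations/gdrive_rcca.py | _slice_after_label
-- ===== SOURCE A (Python) =====
-- def _slice_after_label(text: str, label: str, stop_at: list[str]) -> str:
--     """Extract content after `label` until the earliest of stop_at labels (case-insensitive)."""
--     t = text or ""
--     li = t.lower().find(label.lower())
--     if li < 0:
--         return ""
--     rest = t[li + len(label) :].lstrip()
--     if rest.startswith(":"):
--         rest = rest[1:].lstrip()
--     cut = len(rest)
--     for stop in stop_at:
--         si = rest.lower().find(stop.lower())
--         if si >= 0 and si < cut:
--             cut = si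
--     return rest[:cut].strip()
-- ===== SOURCE B (Python) =====
-- def _slice_after_label(text: str, label: str, stop_at: list[str]) -> str:
--     t = text or ""
--     li = t.lower().find(label.lower())
--     if li < 0:
--         return ""
--     rest = t[li + len(label):].lstrip()
--     if rest.startswith(":"):
--         rest = rest[1:].lstrip()
--     low = rest.lower()
--     stops = [s.lower() for s in stop_at]
--     cut = len(rest)
--     for i in range(len(low)):
--         if any(low.startswith(s, i) for s in stops):
--             cut = i
--             break
--     return rest[:cut].strip()
-- ===== Notes on version B (the rewrite author's own statement) =====
-- stated objective: alternative
-- what changed: A's per-stop-label find() loop that minimises over separate substring searches is replaced by one left-to-right scan of the lowercased text that stops at the first position where any (pre-lowered) stop label matches.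
import Mathlib
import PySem

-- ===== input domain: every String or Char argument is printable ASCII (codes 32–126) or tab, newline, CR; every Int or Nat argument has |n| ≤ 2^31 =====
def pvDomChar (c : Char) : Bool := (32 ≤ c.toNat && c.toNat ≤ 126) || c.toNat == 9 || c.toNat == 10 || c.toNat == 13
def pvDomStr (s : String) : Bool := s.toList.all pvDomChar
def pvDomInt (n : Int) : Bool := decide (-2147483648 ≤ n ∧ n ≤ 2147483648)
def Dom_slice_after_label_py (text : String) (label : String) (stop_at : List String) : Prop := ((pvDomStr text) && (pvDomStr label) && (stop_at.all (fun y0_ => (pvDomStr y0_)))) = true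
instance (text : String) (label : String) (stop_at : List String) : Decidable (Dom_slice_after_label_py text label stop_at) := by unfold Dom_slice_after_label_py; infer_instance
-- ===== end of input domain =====

-- B replaces A's per-stop find() loop by a single left-to-right scan that stops at the
-- first position where any stop label matches (objective: alternative, same cost class).

-- ===== PORT A =====
-- helper: A's `for stop in stop_at: si = rest.lower().find(stop.lower()); if si >= 0 and si < cut: cut = si`
-- generalised over the already-lowered patterns ps (the port applies it via List.foldl over stop_at)
def slice_after_label_py (text : String) (label : String) (stop_at : List String) : String :=
  let t := text.toList                                  -- t = text or ""  ("" behaves identically)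
  let li := PySem.Chars.find (PySem.Chars.lower t) (PySem.Chars.lower label.toList)
  if li < 0 then ""
  else
    let rest0 := PySem.Chars.lstrip (PySem.List.slice t (some (li + (label.toList.length : Int))) none)
    let rest := if PySem.Chars.startswith rest0 [':']
                then PySem.Chars.lstrip (PySem.List.slice rest0 (some 1) none) else rest0
    let cut := stop_at.foldl (fun cut stop =>
      if 0 ≤ PySem.Chars.find (PySem.Chars.lower rest) (PySem.Chars.lower stop.toList) ∧
         PySem.Chars.find (PySem.Chars.lower rest) (PySem.Chars.lower stop.toList) < cut
      then PySem.Chars.find (PySem.Chars.lower rest) (PySem.Chars.lower stop.toList) else cut)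
      (rest.length : Int)
    String.ofList (PySem.Chars.strip (PySem.List.slice rest none (some cut)))

-- ===== PORT B =====
-- helper: B's `for i in range(len(low)): if any(low.startswith(s, i) for s in stops): cut = i; break`
def pvScanCut (stops : List (List Char)) (low : List Char) (i : Nat) : Nat :=
  if i < low.length then
    if stops.any (fun s => PySem.Chars.startswith (low.drop i) s) then i
    else pvScanCut stops low (i + 1)
  else low.length
termination_by low.length - i

def slice_after_label_py_alt (text : String) (label : String) (stop_at : List String) : String :=
  let t := text.toList
  let li := PySem.Chars.find (PySem.Chars.lower t) (PySem.Chars.lower label.toList)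
  if li < 0 then ""
  else
    let rest0 := PySem.Chars.lstrip (PySem.List.slice t (some (li + (label.toList.length : Int))) none)
    let rest := if PySem.Chars.startswith rest0 [':']
                then PySem.Chars.lstrip (PySem.List.slice rest0 (some 1) none) else rest0
    let low := PySem.Chars.lower rest
    let stops := stop_at.map (fun s => PySem.Chars.lower s.toList)
    let cut := pvScanCut stops low 0
    String.ofList (PySem.Chars.strip (PySem.List.slice rest none (some (cut : Int))))

-- ===== PRECONDITION & SPEC =====
def Spec_slice_after_label_py (text : String) (label : String) (stop_at : List String) (out : String) : Prop := out = slice_after_label_py_alt text label stop_at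
instance (text : String) (label : String) (stop_at : List String) (out : String) : Decidable (Spec_slice_after_label_py text label stop_at out) := by unfold Spec_slice_after_label_py; infer_instance

-- ===== CLAIM (what is proved, stated in full; the proofs are below) =====
def Claim_equal_slice_after_label_py : Prop := ∀ (text : String) (label : String) (stop_at : List String), Dom_slice_after_label_py text label stop_at → Spec_slice_after_label_py text label stop_at (slice_after_label_py text label stop_at)

-- ===== LEMMAS AND PROOFS =====

-- a prefix of a suffix of low is an infix of low
lemma pv_prefix_drop_infix {p low : List Char} {i : Nat} (h : p <+: low.drop i) : p <:+: low :=
  h.isInfix.trans (low.drop_suffix i).isInfix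

-- characterisation of A's fold: result r has 0 ≤ r ≤ c, no pattern matches strictly before r,
-- and r is either c or a match position of some pattern
lemma pv_cutFold_spec (low : List Char) :
    ∀ (ps : List (List Char)) (c : Int), 0 ≤ c →
      let r := ps.foldl (fun cut p =>
        if 0 ≤ PySem.Chars.find low p ∧ PySem.Chars.find low p < cut
        then PySem.Chars.find low p else cut) c
      0 ≤ r ∧ r ≤ c ∧ (∀ p ∈ ps, ∀ i : Nat, (i : Int) < r → ¬ p <+: low.drop i) ∧
        (r = c ∨ ∃ p ∈ ps, p <+: low.drop r.toNat) := by
  intro ps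
  induction ps with
  | nil => intro c hc; exact ⟨hc, le_refl c, by simp, Or.inl rfl⟩
  | cons p ps ih =>
    intro c hc
    simp only [List.foldl_cons]
    by_cases h : 0 ≤ PySem.Chars.find low p ∧ PySem.Chars.find low p < c
    · rw [if_pos h]
      obtain ⟨hr0, hrle, hno, hmatch⟩ := ih (PySem.Chars.find low p) h.1
      refine ⟨hr0, le_of_lt (lt_of_le_of_lt hrle h.2), ?_, ?_⟩
      · intro q hq i hi
        rcases List.mem_cons.mp hq with hq | hq
        · subst hq
          exact (PySem.Chars.find_spec (s := low) (sub := q) h.1).2 i (by omega)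
        · exact hno q hq i hi
      · rcases hmatch with he | ⟨q, hq, hpre⟩
        · refine Or.inr ⟨p, List.mem_cons_self, ?_⟩
          rw [he]; exact (PySem.Chars.find_spec (s := low) (sub := p) h.1).1
        · exact Or.inr ⟨q, List.mem_cons_of_mem _ hq, hpre⟩
    · rw [if_neg h]
      obtain ⟨hr0, hrle, hno, hmatch⟩ := ih c hc
      refine ⟨hr0, hrle, ?_, ?_⟩
      · intro q hq i hi
        rcases List.mem_cons.mp hq with hq | hq
        · subst hq
          by_cases hneg : PySem.Chars.find low q < 0
          · have hne : PySem.Chars.find low q = -1 := by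
              have := PySem.Chars.neg_one_le_find (s := low) (sub := q); omega
            have hnin : ¬ q <:+: low := (PySem.Chars.find_eq_neg_one_iff _ _).mp hne
            intro hpre; exact hnin (pv_prefix_drop_infix hpre)
          · push Not at hneg
            have hge : c ≤ PySem.Chars.find low q := by
              by_contra hlt; push Not at hlt; exact h ⟨hneg, hlt⟩
            exact (PySem.Chars.find_spec (s := low) (sub := q) hneg).2 i (by omega)
        · exact hno q hq i hi
      · rcases hmatch with he | ⟨q, hq, hpre⟩
        · exact Or.inl he
        · exact Or.inr ⟨q, List.mem_cons_of_mem _ hq, hpre⟩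

-- characterisation of B's scan: result r has r ≤ len, no pattern matches in [i, r),
-- and r is either len or a match position
lemma pv_scanCut_spec (stops : List (List Char)) (low : List Char) :
    ∀ i : Nat,
      pvScanCut stops low i ≤ low.length ∧
      (∀ j : Nat, i ≤ j → j < pvScanCut stops low i → ¬ ∃ s ∈ stops, s <+: low.drop j) ∧
      (pvScanCut stops low i = low.length ∨ ∃ s ∈ stops, s <+: low.drop (pvScanCut stops low i)) := by
  intro i
  fun_induction pvScanCut stops low i with
  | case1 i hlt hany =>
    refine ⟨le_of_lt hlt, by intro j h1 h2 _; omega, Or.inr ?_⟩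
    obtain ⟨s, hs, hsw⟩ := List.any_eq_true.mp hany
    exact ⟨s, hs, (PySem.Chars.startswith_iff _ _).mp hsw⟩
  | case2 i hlt hany ih =>
    obtain ⟨h2, h3, h4⟩ := ih
    refine ⟨h2, ?_, h4⟩
    intro j hij hjr hex
    rcases Nat.eq_or_lt_of_le hij with he | hlt'
    · obtain ⟨s, hs, hpre⟩ := hex
      have hha : stops.any (fun s => PySem.Chars.startswith (low.drop i) s) = true := by
        rw [he]; exact List.any_eq_true.mpr ⟨s, hs, (PySem.Chars.startswith_iff _ _).mpr hpre⟩
      exact absurd hha (by simpa using hany)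
    · exact h3 j hlt' hjr hex
  | case3 i hge => exact ⟨le_refl _, by intro j h1 h2 _; omega, Or.inl rfl⟩

-- the two cut computations agree
lemma pv_cut_eq (low : List Char) (ps : List (List Char)) :
    ps.foldl (fun cut p =>
        if 0 ≤ PySem.Chars.find low p ∧ PySem.Chars.find low p < cut
        then PySem.Chars.find low p else cut) (low.length : Int)
      = ((pvScanCut ps low 0 : Nat) : Int) := by
  obtain ⟨ha0, hale, hano, ham⟩ :=
    pv_cutFold_spec low ps (low.length : Int) (Int.natCast_nonneg _)
  obtain ⟨hble, hbno, hbm⟩ := pv_scanCut_spec ps low 0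
  set rA := ps.foldl (fun cut p =>
        if 0 ≤ PySem.Chars.find low p ∧ PySem.Chars.find low p < cut
        then PySem.Chars.find low p else cut) (low.length : Int) with hrA
  set rB := pvScanCut ps low 0 with hrB
  rcases lt_trichotomy rA ((rB : Nat) : Int) with hlt | heq | hgt
  · exfalso
    have hAne : rA ≠ (low.length : Int) := by
      have : ((rB : Nat) : Int) ≤ (low.length : Int) := by exact_mod_cast hble
      omega
    rcases ham with he | ⟨p, hp, hpre⟩
    · exact hAne he
    · exact hbno rA.toNat (Nat.zero_le _) (by omega) ⟨p, hp, hpre⟩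
  · exact heq
  · exfalso
    have hBne : rB ≠ low.length := by
      have h1 : ((rB : Nat) : Int) < (low.length : Int) := lt_of_lt_of_le hgt hale
      omega
    rcases hbm with he | ⟨p, hp, hpre⟩
    · exact hBne he
    · exact hano p hp rB hgt hpre

-- ===== VERDICT (by name: the statement is the Claim_ definition above) =====
theorem slice_after_label_py_spec : Claim_equal_slice_after_label_py := by
  intro text label stop_at _
  unfold Spec_slice_after_label_py slice_after_label_py slice_after_label_py_alt
  by_cases hli : PySem.Chars.find (PySem.Chars.lower text.toList) (PySem.Chars.lower label.toList) < 0
  · simp only [hli, if_true]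
  · simp only [hli, if_false]
    set rest := (if PySem.Chars.startswith
        (PySem.Chars.lstrip (PySem.List.slice text.toList
          (some (PySem.Chars.find (PySem.Chars.lower text.toList) (PySem.Chars.lower label.toList)
            + (label.toList.length : Int))) none)) [':']
      then PySem.Chars.lstrip (PySem.List.slice
        (PySem.Chars.lstrip (PySem.List.slice text.toList
          (some (PySem.Chars.find (PySem.Chars.lower text.toList) (PySem.Chars.lower label.toList)
            + (label.toList.length : Int))) none)) (some 1) none)
      else PySem.Chars.lstrip (PySem.List.slice text.toList
          (some (PySem.Chars.find (PySem.Chars.lower text.toList) (PySem.Chars.lower label.toList)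
            + (label.toList.length : Int))) none)) with hrest
    have hlen : (PySem.Chars.lower rest).length = rest.length := by
      simp [PySem.Chars.lower]
    have := pv_cut_eq (PySem.Chars.lower rest) (stop_at.map (fun s => PySem.Chars.lower s.toList))
    rw [List.foldl_map, hlen] at this
    rw [this]
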